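-- pv_equiv track=rewrite | github.com/coxlab/physiology_analysis | reports/clustermerge.py | get_merged
-- ===== SOURCE A (Python) =====
-- def get_merged(merges, cid, blacklist=None):
--     #print "calling get_merged with: %s, %s, %s" % (merges, cid, blacklist)
--     if blacklist is None:
--         blacklist = []
--     if (cid in blacklist) or (cid not in merges):
--         return []
--     blacklist.append(cid)
--     others = []
--     for o in merges[cid]:
--         if o not in blacklist:
--             others.append(o)
--             others += get_merged(merges, o, blacklist)
--     return others
-- ===== SOURCE B (Python) =====
-- def get_merged(merges, cid, blacklist=None):
--     if blacklist is None:
--         blacklist = []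
--     if (cid in blacklist) or (cid not in merges):
--         return []
--     blacklist.append(cid)
--     others = []
--     stack = [iter(merges[cid])]
--     while stack:
--         o = next(stack[-1], None)
--         if o is None:
--             stack.pop()
--         elif o not in blacklist:
--             others.append(o)
--             if o in merges:
--                 blacklist.append(o)
--                 stack.append(iter(merges[o]))
--     return others
-- ===== Notes on version B (the rewrite author's own statement) =====
-- stated objective: alternative
-- what changed: A's recursive DFS (function calls itself for each merged neighbour) is replaced by an iterative DFS driven by an explicit stack of pending neighbour iterators, threading the same blacklist and producing the identical pre-order output without recursion.
import Mathlib
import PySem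

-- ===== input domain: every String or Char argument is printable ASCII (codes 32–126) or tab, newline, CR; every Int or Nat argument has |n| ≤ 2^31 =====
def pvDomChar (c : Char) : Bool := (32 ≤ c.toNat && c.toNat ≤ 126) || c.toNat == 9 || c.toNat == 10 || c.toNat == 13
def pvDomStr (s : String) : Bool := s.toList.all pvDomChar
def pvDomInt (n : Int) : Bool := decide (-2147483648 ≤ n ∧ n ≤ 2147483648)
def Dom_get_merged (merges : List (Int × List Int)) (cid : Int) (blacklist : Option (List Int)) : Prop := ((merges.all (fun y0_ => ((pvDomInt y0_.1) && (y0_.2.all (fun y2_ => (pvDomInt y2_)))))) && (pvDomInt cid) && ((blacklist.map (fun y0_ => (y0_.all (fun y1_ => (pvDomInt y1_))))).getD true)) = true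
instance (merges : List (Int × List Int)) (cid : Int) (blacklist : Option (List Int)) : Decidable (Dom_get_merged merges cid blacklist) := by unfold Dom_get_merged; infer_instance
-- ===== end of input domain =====

-- B replaces A's recursion by an iterative DFS over an explicit stack of pending
-- neighbour lists (same pre-order output, same blacklist discipline); objective:
-- alternative decomposition, same asymptotic cost. Both A and B mutate the caller's
-- `blacklist` list identically; the equivalence proved here is about the return value.

-- ===== PORT A =====
-- first-match lookup in the association list (Python dict lookup)
def plook : List (Int × List Int) → Int → Option (List Int)
  | [], _ => none
  | (k, v) :: rest, x => if k == x then some v else plook rest x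

-- A's recursion, with a fuel counter that only makes the recursion total in Lean:
-- each level of nesting blacklists one fresh key of `merges`, so `merges.length + 1`
-- levels always suffice and the 0-fuel branch is unreachable from `get_merged`.
mutual
def goA (merges : List (Int × List Int)) (fuel : Nat) (cid : Int) (bl : List Int) :
    List Int × List Int :=
  match fuel with
  | 0 => ([], bl)
  | f + 1 =>
    if bl.contains cid then ([], bl)
    else
      match plook merges cid with
      | none => ([], bl)
      | some ns => loopA merges f ns [] (bl ++ [cid])
termination_by (fuel, 0)

-- the `for o in merges[cid]` loop of A, threading (others, blacklist)
def loopA (merges : List (Int × List Int)) (fuel : Nat) (ns : List Int)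
    (acc bl : List Int) : List Int × List Int :=
  match ns with
  | [] => (acc, bl)
  | o :: os =>
    if bl.contains o then loopA merges fuel os acc bl
    else
      let p := goA merges fuel o bl
      loopA merges fuel os (acc ++ o :: p.1) p.2
termination_by (fuel, ns.length + 1)
end

def get_merged (merges : List (Int × List Int)) (cid : Int) (blacklist : Option (List Int)) : List Int :=
  (goA merges (merges.length + 1) cid (blacklist.getD [])).1

-- ===== PORT B =====
-- helpers for runB's termination measure (number of not-yet-blacklisted key occurrences)
def pvKeysLeft (merges : List (Int × List Int)) (bl : List Int) : Nat :=
  ((merges.map Prod.fst).filter (fun a => !bl.contains a)).length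

theorem pv_contains_append_self (bl : List Int) (o : Int) : (bl ++ [o]).contains o = true := by
  rw [List.contains_append]
  have h1 : [o].contains o = true := by simp
  rw [h1, Bool.or_true]

theorem pv_contains_append_right (bl : List Int) (o x : Int) (hx : bl.contains x = true) :
    (bl ++ [o]).contains x = true := by
  rw [List.contains_append, hx, Bool.true_or]

theorem pv_bnot_true {b : Bool} (h : ¬ b = true) : (!b) = true := by
  cases b
  · rfl
  · exact absurd rfl h

theorem pv_not_bnot {b : Bool} (h : b = true) : ¬ (!b) = true := by
  rw [h]; simp

theorem plook_mem {merges : List (Int × List Int)} {o : Int} {ns : List Int}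
    (h : plook merges o = some ns) : o ∈ merges.map Prod.fst := by
  induction merges with
  | nil => simp [plook] at h
  | cons kv rest ih =>
    obtain ⟨k, v⟩ := kv
    by_cases hk : (k == o) = true
    · exact List.mem_map.mpr ⟨(k, v), List.mem_cons_self, eq_of_beq hk⟩
    · rw [plook, if_neg hk] at h
      rw [List.map_cons]
      exact List.mem_cons_of_mem _ (ih h)

theorem pv_filter_mono (keys bl bl' : List Int)
    (h : ∀ x : Int, bl.contains x = true → bl'.contains x = true) :
    (keys.filter (fun a => !bl'.contains a)).length ≤ (keys.filter (fun a => !bl.contains a)).length := by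
  induction keys with
  | nil => exact Nat.le_refl _
  | cons a ks ih =>
    rw [List.filter_cons, List.filter_cons]
    by_cases hb : bl.contains a = true
    · rw [if_neg (pv_not_bnot (h a hb)), if_neg (pv_not_bnot hb)]
      exact ih
    · by_cases hb' : bl'.contains a = true
      · rw [if_neg (pv_not_bnot hb'), if_pos (pv_bnot_true hb)]
        rw [List.length_cons]
        omega
      · rw [if_pos (pv_bnot_true hb'), if_pos (pv_bnot_true hb)]
        rw [List.length_cons, List.length_cons]
        omega

theorem pv_filter_lt (keys : List Int) (bl : List Int) (o : Int) (hm : o ∈ keys)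
    (hb : ¬ bl.contains o = true) :
    (keys.filter (fun a => !(bl ++ [o]).contains a)).length <
      (keys.filter (fun a => !bl.contains a)).length := by
  induction keys with
  | nil => cases hm
  | cons a ks ih =>
    rw [List.filter_cons, List.filter_cons]
    rcases List.mem_cons.mp hm with rfl | hm'
    · rw [if_neg (pv_not_bnot (pv_contains_append_self bl o)), if_pos (pv_bnot_true hb)]
      rw [List.length_cons]
      have hmono := pv_filter_mono ks bl (bl ++ [o]) (fun x hx => pv_contains_append_right bl o x hx)
      omega
    · by_cases hba : bl.contains a = true
      · rw [if_neg (pv_not_bnot (pv_contains_append_right bl o a hba)), if_neg (pv_not_bnot hba)]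
        exact ih hm'
      · by_cases hoa : (bl ++ [o]).contains a = true
        · rw [if_neg (pv_not_bnot hoa), if_pos (pv_bnot_true hba)]
          rw [List.length_cons]
          have := ih hm'
          omega
        · rw [if_pos (pv_bnot_true hoa), if_pos (pv_bnot_true hba)]
          rw [List.length_cons, List.length_cons]
          have := ih hm'
          omega

theorem pvKeysLeft_lt_of_key {merges : List (Int × List Int)} {o : Int} {ns : List Int}
    {bl : List Int} (hp : plook merges o = some ns) (hb : ¬ bl.contains o = true) :
    pvKeysLeft merges (bl ++ [o]) < pvKeysLeft merges bl := by
  unfold pvKeysLeft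
  exact pv_filter_lt _ _ _ (plook_mem hp) hb

-- B: iterative DFS, explicit stack of pending neighbour lists
def runB (merges : List (Int × List Int)) (stack : List (List Int))
    (others bl : List Int) : List Int :=
  match stack with
  | [] => others
  | [] :: rest => runB merges rest others bl
  | (o :: os) :: rest =>
    if bl.contains o then runB merges (os :: rest) others bl
    else
      match h : plook merges o with
      | none => runB merges (os :: rest) (others ++ [o]) bl
      | some ns => runB merges (ns :: os :: rest) (others ++ [o]) (bl ++ [o])
termination_by (pvKeysLeft merges bl, (stack.map List.length).sum + stack.length)
decreasing_by
  all_goals simp_wf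
  all_goals first
    | (exact Prod.Lex.right _ (by omega))
    | (exact Prod.Lex.left _ _ (pvKeysLeft_lt_of_key (by assumption) (by assumption)))

def get_merged_alt (merges : List (Int × List Int)) (cid : Int) (blacklist : Option (List Int)) : List Int :=
  if (blacklist.getD []).contains cid then []
  else
    match plook merges cid with
    | none => []
    | some ns => runB merges [ns] [] (blacklist.getD [] ++ [cid])

-- ===== PRECONDITION & SPEC =====
def Spec_get_merged (merges : List (Int × List Int)) (cid : Int) (blacklist : Option (List Int)) (out : List Int) : Prop := out = get_merged_alt merges cid blacklist
instance (merges : List (Int × List Int)) (cid : Int) (blacklist : Option (List Int)) (out : List Int) : Decidable (Spec_get_merged merges cid blacklist out) := by unfold Spec_get_merged; infer_instance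

-- ===== CLAIM (what is proved, stated in full; the proofs are below) =====
def Claim_equal_get_merged : Prop := ∀ (merges : List (Int × List Int)) (cid : Int) (blacklist : Option (List Int)), Dom_get_merged merges cid blacklist → Spec_get_merged merges cid blacklist (get_merged merges cid blacklist)

-- ===== LEMMAS AND PROOFS =====

theorem pvKeysLeft_le (merges : List (Int × List Int)) (bl : List Int) :
    pvKeysLeft merges bl ≤ merges.length := by
  unfold pvKeysLeft
  calc ((merges.map Prod.fst).filter _).length ≤ (merges.map Prod.fst).length :=
        List.length_filter_le _ _
    _ = merges.length := List.length_map ..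

theorem pvKeysLeft_mono {merges : List (Int × List Int)} {bl bl' : List Int}
    (h : ∀ x : Int, bl.contains x = true → bl'.contains x = true) :
    pvKeysLeft merges bl' ≤ pvKeysLeft merges bl :=
  pv_filter_mono _ _ _ h

-- the blacklist only grows through A's loop
theorem loopA_sub (merges : List (Int × List Int)) :
    ∀ (fuel : Nat) (ns acc bl : List Int) (x : Int), bl.contains x = true →
      ((loopA merges fuel ns acc bl).2).contains x = true := by
  intro fuel
  induction fuel with
  | zero =>
    intro ns
    induction ns with
    | nil => intro acc bl x hx; rw [loopA]; exact hx
    | cons o os ih =>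
      intro acc bl x hx
      by_cases hb : bl.contains o = true
      · rw [loopA, if_pos hb]; exact ih acc bl x hx
      · rw [loopA, if_neg hb]
        rw [goA]
        exact ih _ bl x hx
  | succ f ihf =>
    intro ns
    induction ns with
    | nil => intro acc bl x hx; rw [loopA]; exact hx
    | cons o os ih =>
      intro acc bl x hx
      by_cases hb : bl.contains o = true
      · rw [loopA, if_pos hb]; exact ih acc bl x hx
      · rw [loopA, if_neg hb]
        cases hp : plook merges o with
        | none => rw [goA, if_neg hb, hp]; exact ih _ bl x hx
        | some ns2 =>
          rw [goA, if_neg hb, hp]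
          exact ih _ _ x (ihf ns2 [] (bl ++ [o]) x (pv_contains_append_right bl o x hx))

-- the accumulator of A's loop is a pure prefix
theorem loopA_acc (merges : List (Int × List Int)) (fuel : Nat) :
    ∀ (ns acc bl : List Int),
      loopA merges fuel ns acc bl =
        (acc ++ (loopA merges fuel ns [] bl).1, (loopA merges fuel ns [] bl).2) := by
  intro ns
  induction ns with
  | nil => intro acc bl; rw [loopA, loopA]; simp
  | cons o os ih =>
    intro acc bl
    by_cases hb : bl.contains o = true
    · rw [loopA, if_pos hb]
      conv_rhs => rw [loopA, if_pos hb]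
      exact ih acc bl
    · rw [loopA, if_neg hb]
      conv_rhs => rw [loopA, if_neg hb]
      rw [ih (acc ++ o :: (goA merges fuel o bl).1) (goA merges fuel o bl).2,
          ih ([] ++ o :: (goA merges fuel o bl).1) (goA merges fuel o bl).2]
      simp [List.append_assoc]

-- step equations of B's stack machine
theorem runB_skip {merges : List (Int × List Int)} {o : Int} {bl : List Int}
    (os : List Int) (rest : List (List Int)) (acc : List Int) (hb : bl.contains o = true) :
    runB merges ((o :: os) :: rest) acc bl = runB merges (os :: rest) acc bl := by
  rw [runB, if_pos hb]

theorem runB_leaf {merges : List (Int × List Int)} {o : Int} {bl : List Int}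
    (os : List Int) (rest : List (List Int)) (acc : List Int)
    (hb : ¬ bl.contains o = true) (hp : plook merges o = none) :
    runB merges ((o :: os) :: rest) acc bl = runB merges (os :: rest) (acc ++ [o]) bl := by
  rw [runB, if_neg hb]
  split
  · rfl
  · rename_i ns heq
    rw [hp] at heq
    cases heq

theorem runB_key {merges : List (Int × List Int)} {o : Int} {bl ns : List Int}
    (os : List Int) (rest : List (List Int)) (acc : List Int)
    (hb : ¬ bl.contains o = true) (hp : plook merges o = some ns) :
    runB merges ((o :: os) :: rest) acc bl =
      runB merges (ns :: os :: rest) (acc ++ [o]) (bl ++ [o]) := by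
  rw [runB, if_neg hb]
  split
  · rename_i heq
    rw [hp] at heq
    cases heq
  · rename_i ns' heq
    rw [hp] at heq
    injection heq with h2
    subst h2
    rfl

-- simulation: B's stack machine runs A's loop frame by frame
theorem runB_sim (merges : List (Int × List Int)) :
    ∀ (fuel : Nat) (ns acc bl : List Int) (rest : List (List Int)),
      pvKeysLeft merges bl < fuel →
      runB merges (ns :: rest) acc bl =
        runB merges rest (loopA merges fuel ns acc bl).1 (loopA merges fuel ns acc bl).2 := by
  intro fuel
  induction fuel with
  | zero => intro ns acc bl rest h; omega
  | succ f ihf =>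
    intro ns
    induction ns with
    | nil => intro acc bl rest h; rw [loopA, runB]
    | cons o os ih =>
      intro acc bl rest h
      by_cases hb : bl.contains o = true
      · rw [runB_skip os rest acc hb, loopA, if_pos hb]
        exact ih acc bl rest h
      · cases hp : plook merges o with
        | none =>
          rw [runB_leaf os rest acc hb hp, loopA, if_neg hb, goA, if_neg hb, hp]
          exact ih (acc ++ [o]) bl rest h
        | some ns2 =>
          rw [runB_key os rest acc hb hp, loopA, if_neg hb, goA, if_neg hb, hp]
          have hk1 : pvKeysLeft merges (bl ++ [o]) < f := by
            have := pvKeysLeft_lt_of_key hp hb; omega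
          rw [ihf ns2 (acc ++ [o]) (bl ++ [o]) (os :: rest) hk1]
          rw [loopA_acc merges f ns2 (acc ++ [o]) (bl ++ [o])]
          dsimp only
          have hk2 : pvKeysLeft merges (loopA merges f ns2 [] (bl ++ [o])).2 < f + 1 := by
            have hmono : pvKeysLeft merges (loopA merges f ns2 [] (bl ++ [o])).2 ≤
                pvKeysLeft merges (bl ++ [o]) :=
              pvKeysLeft_mono (fun x hx => loopA_sub merges f ns2 [] (bl ++ [o]) x hx)
            omega
          rw [ih ((acc ++ [o]) ++ (loopA merges f ns2 [] (bl ++ [o])).1)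
                (loopA merges f ns2 [] (bl ++ [o])).2 rest hk2]
          simp [List.append_assoc]

-- ===== VERDICT (by name: the statement is the Claim_ definition above) =====
theorem get_merged_spec : Claim_equal_get_merged := by
  intro merges cid blacklist _dom
  unfold Spec_get_merged get_merged get_merged_alt
  by_cases hb : (blacklist.getD []).contains cid = true
  · rw [goA, if_pos hb, if_pos hb]
  · rw [goA, if_neg hb, if_neg hb]
    cases hp : plook merges cid with
    | none => rfl
    | some ns =>
      have hk : pvKeysLeft merges (blacklist.getD [] ++ [cid]) < merges.length := by
        have h1 := pvKeysLeft_lt_of_key hp hb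
        have h2 := pvKeysLeft_le merges (blacklist.getD [])
        omega
      show (loopA merges merges.length ns [] (blacklist.getD [] ++ [cid])).1 =
        runB merges [ns] [] (blacklist.getD [] ++ [cid])
      rw [runB_sim merges merges.length ns [] (blacklist.getD [] ++ [cid]) [] hk, runB]
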